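-- pv_equiv track=rewrite | github.com/kingbj940429/Coding_Test_Solution | beak_joon/b_2810.py | couple_index
-- ===== SOURCE A (Python) =====
-- def couple_index(result_data):
--     data_len = len(result_data)
--     index = []
--     check_cnt = 0
--     for i in range(0, data_len):
--         if(result_data[i] == "L"):
--             check_cnt += 1
--             if(check_cnt == 2):
--                 index.append(i-1)
--                 check_cnt = 0
--     return index
-- ===== SOURCE B (Python) =====
-- def couple_index(result_data):
--     pos = [i for i, c in enumerate(result_data) if c == "L"]
--     it = iter(pos)
--     # zip(it, it) yields consecutive pairs (pos[0], pos[1]), (pos[2], pos[3]), ...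
--     # dropping an unpaired trailing 'L' automatically
--     return [second - 1 for first, second in zip(it, it)]
-- ===== Notes on version B (the rewrite author's own statement) =====
-- stated objective: alternative
-- what changed: Replaces the running mod-2 counter with building the index table of 'L' positions once and then pairing consecutive entries, emitting second-of-pair minus one.
import Mathlib
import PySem

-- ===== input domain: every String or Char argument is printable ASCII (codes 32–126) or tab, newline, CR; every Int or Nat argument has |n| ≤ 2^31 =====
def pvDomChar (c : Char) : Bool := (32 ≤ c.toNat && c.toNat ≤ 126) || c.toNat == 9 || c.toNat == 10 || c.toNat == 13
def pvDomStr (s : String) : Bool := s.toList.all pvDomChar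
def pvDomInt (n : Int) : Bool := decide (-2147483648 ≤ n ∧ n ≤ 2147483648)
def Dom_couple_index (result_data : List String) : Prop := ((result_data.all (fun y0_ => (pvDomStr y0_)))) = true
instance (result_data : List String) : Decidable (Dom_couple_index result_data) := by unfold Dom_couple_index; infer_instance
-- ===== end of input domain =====

-- ===== PORT A =====
-- B builds the table of 'L' positions once and pairs consecutive entries; same O(n) cost, different decomposition.
-- loop over i in range(0, data_len) with state (index, check_cnt), via enumerate (i, result_data[i])
def coupleLoop : List (Int × String) → List Int → Int → List Int
  | [], idx, _ => idx
  | (i, s) :: rest, idx, cnt =>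
    if s == "L" then
      let c := cnt + 1
      if c == 2 then coupleLoop rest (idx ++ [i - 1]) 0
      else coupleLoop rest idx c
    else coupleLoop rest idx cnt

def couple_index (result_data : List String) : List Int :=
  coupleLoop (PySem.List.enumerate result_data) [] 0

-- ===== PORT B =====
-- pair ps: if len(ps) < 2 return []; else [ps[1]-1] + pair(ps[2:])
-- [second - 1 for first, second in zip(it, it)]: consecutive pairing of pos, hand-ported (exact: zip of one iterator with itself yields (ps[0],ps[1]),(ps[2],ps[3]),…)
def couplePair : List Int → List Int
  | _ :: q :: rest => (q - 1) :: couplePair rest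
  | _ => []

def couple_index_alt (result_data : List String) : List Int :=
  couplePair (((PySem.List.enumerate result_data).filter (fun p => p.2 == "L")).map (fun p => p.1))

-- ===== PRECONDITION & SPEC =====
def Spec_couple_index (result_data : List String) (out : List Int) : Prop := out = couple_index_alt result_data
instance (result_data : List String) (out : List Int) : Decidable (Spec_couple_index result_data out) := by unfold Spec_couple_index; infer_instance

-- ===== CLAIM (what is proved, stated in full; the proofs are below) =====
def Claim_equal_couple_index : Prop := ∀ (result_data : List String), Dom_couple_index result_data → Spec_couple_index result_data (couple_index result_data)

-- ===== LEMMAS AND PROOFS =====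

-- ===== VERDICT (by name: the statement is the Claim_ definition above) =====
-- couplePair with one pending 'L' already counted
def couplePair1 : List Int → List Int
  | q :: rest => (q - 1) :: couplePair rest
  | [] => []

theorem couplePair_cons (i : Int) (xs : List Int) :
    couplePair (i :: xs) = couplePair1 xs := by
  cases xs <;> simp [couplePair, couplePair1]

theorem coupleLoop_eq : ∀ (l : List (Int × String)) (acc : List Int),
    (coupleLoop l acc 0 = acc ++ couplePair ((l.filter (fun p => p.2 == "L")).map (fun p => p.1))) ∧
    (coupleLoop l acc 1 = acc ++ couplePair1 ((l.filter (fun p => p.2 == "L")).map (fun p => p.1))) := by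
  intro l
  induction l with
  | nil => intro acc; simp [coupleLoop, couplePair, couplePair1]
  | cons hd tl ih =>
    intro acc
    obtain ⟨i, s⟩ := hd
    by_cases hs : s = "L"
    · constructor
      · simp [coupleLoop, hs, couplePair_cons, (ih acc).2]
      · simp [coupleLoop, hs, couplePair1, (ih (acc ++ [i-1])).1]
    · simp [coupleLoop, hs, ih acc]

theorem couple_index_spec : Claim_equal_couple_index := by
  intro rd _
  unfold Spec_couple_index couple_index couple_index_alt
  simpa using (coupleLoop_eq (PySem.List.enumerate rd) []).1
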